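-- pv_equiv track=rewrite | github.com/WooJin1993/coding_test | 14th/문제5/solution.py | dfs
-- ===== SOURCE A (Python) =====
-- def dfs(l, idx, num, dp, child):
--     if idx == -1:
--         return
--
--     left = child[idx][0]
--     right = child[idx][1]
--
--     dfs(l, left, num, dp, child)
--     dfs(l, right, num, dp, child)
--
--     dp[idx][0] = dp[left][0] + dp[right][0]
--
--     if num[idx] + dp[left][1] + dp[right][1] <= l:
--         dp[idx][1] = num[idx] + dp[left][1] + dp[right][1]
--     elif num[idx] + dp[left][1] <= l or num[idx] + dp[right][1] <= l:
--         dp[idx][0] += 1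
--         dp[idx][1] = num[idx] + min(dp[left][1], dp[right][1])
--     else:
--         dp[idx][0] += 2
--         dp[idx][1] = num[idx]
--
--         if num[idx] > l:
--             dp[idx][0] = 10000
--
--     return dp[idx][0]
-- ===== SOURCE B (Python) =====
-- def dfs(l, idx, num, dp, child):
--     if idx == -1:
--         return None
--     stack = [(idx, False)]
--     while stack:
--         i, ready = stack.pop()
--         if i == -1:
--             continue
--         if not ready:
--             stack.append((i, True))
--             stack.append((child[i][1], False))
--             stack.append((child[i][0], False))
--         else:
--             left = child[i][0]
--             right = child[i][1]
--             s = num[i]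
--             total = dp[left][0] + dp[right][0]
--             if s + dp[left][1] + dp[right][1] <= l:
--                 dp[i][0] = total
--                 dp[i][1] = s + dp[left][1] + dp[right][1]
--             elif s + dp[left][1] <= l or s + dp[right][1] <= l:
--                 dp[i][0] = total + 1
--                 dp[i][1] = s + min(dp[left][1], dp[right][1])
--             else:
--                 dp[i][0] = 10000 if s > l else total + 2
--                 dp[i][1] = s
--     return dp[idx][0]
-- ===== Notes on version B (the rewrite author's own statement) =====
-- stated objective: alternative
-- what changed: The recursive post-order DFS is replaced by an iterative explicit-stack (visit-flag) post-order loop that applies the same dp recurrence, so B uses no recursion at all.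
import Mathlib
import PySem

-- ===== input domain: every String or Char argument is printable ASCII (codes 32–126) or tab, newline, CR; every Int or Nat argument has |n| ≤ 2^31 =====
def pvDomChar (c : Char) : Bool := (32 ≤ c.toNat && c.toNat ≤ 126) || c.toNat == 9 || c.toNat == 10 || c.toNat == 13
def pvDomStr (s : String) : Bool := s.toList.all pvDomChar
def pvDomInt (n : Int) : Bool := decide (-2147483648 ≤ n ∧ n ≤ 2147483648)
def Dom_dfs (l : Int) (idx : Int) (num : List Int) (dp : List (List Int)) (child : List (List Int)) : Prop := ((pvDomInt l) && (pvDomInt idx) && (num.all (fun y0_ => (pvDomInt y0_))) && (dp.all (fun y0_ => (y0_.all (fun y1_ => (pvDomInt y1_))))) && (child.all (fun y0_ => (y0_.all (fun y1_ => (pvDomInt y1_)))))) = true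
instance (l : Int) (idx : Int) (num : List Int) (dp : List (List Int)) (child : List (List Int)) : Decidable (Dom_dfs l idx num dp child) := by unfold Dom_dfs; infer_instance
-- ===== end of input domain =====

-- B replaces A's recursive post-order DFS by an iterative explicit-stack post-order loop over the
-- same dp recurrence (alternative decomposition, same cost). Both Pythons mutate dp in place in the
-- same way; the equivalence proved here is about the RETURN value.

-- ===== PORT A =====
-- shared read helper: xss[i][j] with Python negative-index wrap; Pre_ guarantees all such reads are in range
def pyv (xss : List (List Int)) (i j : Int) : Int :=
  PySem.List.pyGetD (PySem.List.pyGetD xss i []) j 0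

-- dp[i][j] = v ; under Pre_ every written index satisfies -len ≤ i < len (Python wrap), j < row length
def setAt (dp : List (List Int)) (i : Int) (j : Nat) (v : Int) : List (List Int) :=
  dp.modify (if i < 0 then i + dp.length else i).toNat (fun row => row.set j v)

-- A's recursion, with dp threaded as state; fuel bounds the recursion DEPTH, which under Pre_
-- (the reachable child graph is acyclic, so no node repeats on a path) is at most child.length + 1
def dfsGo (l : Int) (num : List Int) (child : List (List Int)) : Nat → Int → List (List Int) → List (List Int)
  | 0, _, dp => dp
  | f + 1, idx, dp =>
    if idx = -1 then dp
    else
      let left := pyv child idx 0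
      let right := pyv child idx 1
      let dp := dfsGo l num child f left dp
      let dp := dfsGo l num child f right dp
      let s := PySem.List.pyGetD num idx 0
      let dl0 := pyv dp left 0
      let dr0 := pyv dp right 0
      let dl1 := pyv dp left 1
      let dr1 := pyv dp right 1
      let dp := setAt dp idx 0 (dl0 + dr0)
      if s + dl1 + dr1 ≤ l then setAt dp idx 1 (s + dl1 + dr1)
      else if s + dl1 ≤ l ∨ s + dr1 ≤ l then
        setAt (setAt dp idx 0 (dl0 + dr0 + 1)) idx 1 (s + min dl1 dr1)
      else
        let dp := setAt (setAt dp idx 0 (dl0 + dr0 + 2)) idx 1 s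
        if s > l then setAt dp idx 0 10000 else dp

def dfs (l : Int) (idx : Int) (num : List Int) (dp : List (List Int)) (child : List (List Int)) : Option Int :=
  if idx = -1 then none
  else
    let dp' := dfsGo l num child (child.length + 2) idx dp
    some (pyv dp' idx 0)

-- ===== PORT B =====
-- one post-order processing step of B's loop (the 'ready' branch of the Python while loop)
def stepB (l : Int) (num : List Int) (child : List (List Int)) (i : Int) (dp : List (List Int)) : List (List Int) :=
  let left := pyv child i 0
  let right := pyv child i 1
  let s := PySem.List.pyGetD num i 0
  let total := pyv dp left 0 + pyv dp right 0
  if s + pyv dp left 1 + pyv dp right 1 ≤ l then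
    setAt (setAt dp i 0 total) i 1 (s + pyv dp left 1 + pyv dp right 1)
  else if s + pyv dp left 1 ≤ l ∨ s + pyv dp right 1 ≤ l then
    setAt (setAt dp i 0 (total + 1)) i 1 (s + min (pyv dp left 1) (pyv dp right 1))
  else
    setAt (setAt dp i 0 (if s > l then 10000 else total + 2)) i 1 s

-- B's while loop; the list head is the stack top. Fuel bounds the number of iterations: the
-- unfolded tree of depth ≤ child.length + 2 has fewer than 3 * 2^(child.length + 2) nodes.
def dfsLoop (l : Int) (num : List Int) (child : List (List Int)) : Nat → List (Int × Bool) → List (List Int) → List (List Int)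
  | 0, _, dp => dp
  | _ + 1, [], dp => dp
  | f + 1, (i, ready) :: rest, dp =>
    if i = -1 then dfsLoop l num child f rest dp
    else if ready then dfsLoop l num child f rest (stepB l num child i dp)
    else dfsLoop l num child f ((pyv child i 0, false) :: (pyv child i 1, false) :: (i, true) :: rest) dp

def dfs_alt (l : Int) (idx : Int) (num : List Int) (dp : List (List Int)) (child : List (List Int)) : Option Int :=
  if idx = -1 then none
  else
    let dp' := dfsLoop l num child (3 * 2 ^ (child.length + 2)) [(idx, false)] dp
    some (pyv dp' idx 0)

-- ===== PRECONDITION & SPEC =====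
-- helpers describing the shape of the child graph (used by Pre_)

-- the row index a possibly negative Python index i refers to
def normC (n : Nat) (e : Int) : Nat := (if e < 0 then e + n else e).toNat

-- the two entries A reads from row j
def row2 (child : List (List Int)) (j : Nat) : List Int := (child.getD j []).take 2

-- the (normalised) recursive calls made from node j that are not the -1 base case
def childrenF (child : List (List Int)) (j : Nat) : Finset Nat :=
  ((row2 child j).filterMap (fun e =>
    if e ≠ -1 ∧ -(child.length : Int) ≤ e ∧ e < (child.length : Int)
    then some (normC child.length e) else none)).toFinset

-- one step of graph reachability, and its (child.length+1)-fold iteration = the reachable set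
def stepF (child : List (List Int)) (s : Finset Nat) : Finset Nat :=
  s ∪ s.biUnion (childrenF child)

def closureF (child : List (List Int)) (s : Finset Nat) : Finset Nat :=
  (stepF child)^[child.length + 1] s

-- all raw index values A touches: idx itself and the first two entries of every reachable row
def rawSet (child : List (List Int)) (idx : Int) : Finset Int :=
  insert idx ((closureF child {normC child.length idx}).biUnion (fun j => (row2 child j).toFinset))

-- dp[r] is a legal Python access with a row long enough for dp[r][0], dp[r][1]
abbrev dpIdxOK (dp : List (List Int)) (r : Int) : Prop :=
  -(dp.length : Int) ≤ r ∧ r < (dp.length : Int) ∧ 2 ≤ (dp.getD (normC dp.length r) []).length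

-- everything A does at raw index r stays in range (r = -1 is only ever a dp read)
abbrev rawOK (num : List Int) (dp : List (List Int)) (child : List (List Int)) (r : Int) : Prop :=
  dpIdxOK dp r ∧
  (r = -1 ∨
    (-(child.length : Int) ≤ r ∧ r < (child.length : Int) ∧
     -(num.length : Int) ≤ r ∧ r < (num.length : Int) ∧
     2 ≤ (child.getD (normC child.length r) []).length))

-- Pre_ excludes exactly the inputs on which the Python A raises: an IndexError (some index or
-- dp/num access reached from idx is out of range, a reached row too short) or a RecursionError
-- (the child graph reachable from idx has a cycle).
def Pre_dfs (l : Int) (idx : Int) (num : List Int) (dp : List (List Int)) (child : List (List Int)) : Prop :=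
  idx = -1 ∨
  (idx ≠ -1 ∧
   (∀ r ∈ rawSet child idx, rawOK num dp child r) ∧
   (∀ j ∈ closureF child {normC child.length idx}, j ∉ closureF child (childrenF child j)))
instance (l : Int) (idx : Int) (num : List Int) (dp : List (List Int)) (child : List (List Int)) : Decidable (Pre_dfs l idx num dp child) := by unfold Pre_dfs; infer_instance

def pvWitness_dfs : Int × Int × List Int × List (List Int) × List (List Int) :=
  (3, 0, [1, 2, 1], [[0, 0], [0, 0], [0, 0]], [[1, 2], [-1, -1], [-1, -1]])

def Spec_dfs (l : Int) (idx : Int) (num : List Int) (dp : List (List Int)) (child : List (List Int)) (out : Option Int) : Prop := out = dfs_alt l idx num dp child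
instance (l : Int) (idx : Int) (num : List Int) (dp : List (List Int)) (child : List (List Int)) (out : Option Int) : Decidable (Spec_dfs l idx num dp child out) := by unfold Spec_dfs; infer_instance

-- ===== CLAIM (what is proved, stated in full; the proofs are below) =====
def Claim_equal_dfs : Prop := ∀ (l : Int) (idx : Int) (num : List Int) (dp : List (List Int)) (child : List (List Int)), Dom_dfs l idx num dp child → Pre_dfs l idx num dp child → Spec_dfs l idx num dp child (dfs l idx num dp child)

-- ===== LEMMAS AND PROOFS =====

-- dp bookkeeping: the two writes of a node commute / collapse (indices identical since modify preserves length)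

theorem modify_modify_same {α : Type} (f g : α → α) : ∀ (l : List α) (k : Nat), (l.modify k f).modify k g = l.modify k (fun x => g (f x)) := by
  intro l
  induction l with
  | nil => intro k; simp
  | cons a t ih =>
    intro k
    cases k with
    | zero => simp
    | succ k => simp [ih]

theorem setAt_setAt_same (dp : List (List Int)) (i : Int) (j : Nat) (x y : Int) :
    setAt (setAt dp i j x) i j y = setAt dp i j y := by
  simp [setAt, List.length_modify, modify_modify_same, List.set_set]

theorem setAt_comm01 (dp : List (List Int)) (i : Int) (x y : Int) :
    setAt (setAt dp i 1 x) i 0 y = setAt (setAt dp i 0 y) i 1 x := by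
  simp only [setAt, List.length_modify, modify_modify_same]
  congr 1
  funext row
  exact List.set_comm x y (by omega)

theorem go_neg1 (l : Int) (num : List Int) (child : List (List Int)) (f : Nat) (dp : List (List Int)) :
    dfsGo l num child f (-1) dp = dp := by
  cases f <;> simp [dfsGo]

theorem go_succ_eq (l : Int) (num : List Int) (child : List (List Int)) (f : Nat) (i : Int) (dp : List (List Int)) (h : i ≠ -1) :
    dfsGo l num child (f + 1) i dp =
      stepB l num child i (dfsGo l num child f (pyv child i 1) (dfsGo l num child f (pyv child i 0) dp)) := by
  simp only [dfsGo, stepB, if_neg h]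
  split_ifs with h1 h2 h3 <;>
    simp [setAt_setAt_same, setAt_comm01]

-- the number of loop iterations B spends on the subtree unfolded below i with fuel f
def cost (child : List (List Int)) : Nat → Int → Nat
  | 0, _ => 1
  | f + 1, i => if i = -1 then 1 else 2 + cost child f (pyv child i 0) + cost child f (pyv child i 1)

theorem cost_neg1 (child : List (List Int)) (f : Nat) : cost child f (-1) = 1 := by
  cases f <;> simp [cost]

theorem cost_le (child : List (List Int)) : ∀ (f : Nat) (i : Int), cost child f i ≤ 3 * 2 ^ f - 2 := by
  intro f
  induction f with
  | zero => intro i; simp [cost]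
  | succ f ih =>
    intro i
    have h1 := ih (pyv child i 0)
    have h2 := ih (pyv child i 1)
    have hp : 1 ≤ 2 ^ f := Nat.one_le_two_pow
    have : (2 : Nat) ^ (f + 1) = 2 * 2 ^ f := by ring
    simp only [cost]
    split_ifs <;> omega

theorem loop_nil (l : Int) (num : List Int) (child : List (List Int)) (f : Nat) (dp : List (List Int)) :
    dfsLoop l num child f [] dp = dp := by
  cases f <;> rfl

theorem loop_neg1 (l : Int) (num : List Int) (child : List (List Int)) (f : Nat) (b : Bool) (rest : List (Int × Bool)) (dp : List (List Int)) :
    dfsLoop l num child (f + 1) ((-1, b) :: rest) dp = dfsLoop l num child f rest dp := by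
  simp [dfsLoop]

-- reachability machinery for the closure in Pre_

def RelC (child : List (List Int)) (a b : Nat) : Prop := b ∈ childrenF child a

theorem subset_stepF (child : List (List Int)) (s : Finset Nat) : s ⊆ stepF child s :=
  Finset.subset_union_left

theorem subset_iterate (child : List (List Int)) (s : Finset Nat) : ∀ (k : Nat), s ⊆ (stepF child)^[k] s := by
  intro k
  induction k with
  | zero => simp
  | succ k ih =>
    rw [Function.iterate_succ_apply']
    exact ih.trans (subset_stepF child _)

theorem childrenF_subset_range (child : List (List Int)) (j : Nat) :
    childrenF child j ⊆ Finset.range child.length := by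
  intro x hx
  simp only [childrenF, List.mem_toFinset, List.mem_filterMap] at hx
  obtain ⟨e, _, he⟩ := hx
  by_cases hg : e ≠ -1 ∧ -(child.length : Int) ≤ e ∧ e < (child.length : Int)
  · rw [if_pos hg, Option.some_inj] at he
    subst he
    simp only [Finset.mem_range, normC]
    omega
  · rw [if_neg hg] at he
    exact absurd he (by simp)

theorem stepF_range (child : List (List Int)) (s : Finset Nat) (hs : s ⊆ Finset.range child.length) :
    stepF child s ⊆ Finset.range child.length := by
  intro x hx
  simp only [stepF, Finset.mem_union, Finset.mem_biUnion] at hx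
  rcases hx with hx | ⟨j, _, hx⟩
  · exact hs hx
  · exact childrenF_subset_range child j hx

theorem iterate_range (child : List (List Int)) (s : Finset Nat) (hs : s ⊆ Finset.range child.length) :
    ∀ (k : Nat), (stepF child)^[k] s ⊆ Finset.range child.length := by
  intro k
  induction k with
  | zero => simpa
  | succ k ih =>
    rw [Function.iterate_succ_apply']
    exact stepF_range child _ ih

theorem card_growth (child : List (List Int)) (s : Finset Nat) :
    ∀ (k : Nat), (∀ m, m < k → (stepF child)^[m + 1] s ≠ (stepF child)^[m] s) →
      s.card + k ≤ ((stepF child)^[k] s).card := by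
  intro k
  induction k with
  | zero => simp
  | succ k ih =>
    intro h
    have h1 := ih (fun m hm => h m (by omega))
    have hne := h k (by omega)
    have hsub : (stepF child)^[k] s ⊆ (stepF child)^[k + 1] s := by
      rw [Function.iterate_succ_apply']
      exact subset_stepF child _
    have hss : (stepF child)^[k] s ⊂ (stepF child)^[k + 1] s :=
      ⟨hsub, fun hle => hne (Finset.Subset.antisymm hle hsub)⟩
    have := Finset.card_lt_card hss
    omega

theorem closure_stable (child : List (List Int)) (s : Finset Nat) (hs : s ⊆ Finset.range child.length) :
    stepF child (closureF child s) = closureF child s := by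
  by_cases H : ∃ m, m ≤ child.length ∧ (stepF child)^[m + 1] s = (stepF child)^[m] s
  · obtain ⟨m, hm, heq⟩ := H
    have hall : ∀ k, m ≤ k → (stepF child)^[k] s = (stepF child)^[m] s := by
      intro k
      induction k with
      | zero =>
        intro hk
        have h0 : m = 0 := by omega
        rw [h0]
      | succ k ih =>
        intro hk
        rcases Nat.lt_or_ge m (k + 1) with hlt | hge
        · rw [Function.iterate_succ_apply', ih (by omega), ← Function.iterate_succ_apply' (stepF child) m s, heq]
        · have : m = k + 1 := by omega
          subst this; rfl
    show stepF child ((stepF child)^[child.length + 1] s) = (stepF child)^[child.length + 1] s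
    rw [← Function.iterate_succ_apply' (stepF child) (child.length + 1) s]
    rw [hall (child.length + 1 + 1) (by omega), hall (child.length + 1) (by omega)]
  · exfalso
    have Hne : ∀ m, m < child.length + 1 → (stepF child)^[m + 1] s ≠ (stepF child)^[m] s :=
      fun m hm heq => H ⟨m, by omega, heq⟩
    have hg := card_growth child s (child.length + 1) Hne
    have hsub := iterate_range child s hs (child.length + 1)
    have := Finset.card_le_card hsub
    simp only [Finset.card_range] at this
    omega

theorem mem_closure_of_reflTransGen (child : List (List Int)) (s : Finset Nat)
    (hs : s ⊆ Finset.range child.length) {e y : Nat} (he : e ∈ s)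
    (h : Relation.ReflTransGen (RelC child) e y) : y ∈ closureF child s := by
  induction h with
  | refl => exact subset_iterate child s (child.length + 1) he
  | tail hab hbc ih =>
    have hstab := closure_stable child s hs
    rw [← hstab]
    simp only [stepF, Finset.mem_union, Finset.mem_biUnion]
    right
    exact ⟨_, ih, hbc⟩

theorem not_transGen_self (child : List (List Int)) (j : Nat)
    (hj : j ∉ closureF child (childrenF child j)) : ¬ Relation.TransGen (RelC child) j j := by
  intro ht
  obtain ⟨e, hje, hrt⟩ := Relation.TransGen.head'_iff.mp ht
  exact hj (mem_closure_of_reflTransGen child (childrenF child j) (childrenF_subset_range child j) hje hrt)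

-- reading the child table through pyv lands on the normalised row

theorem pyv_eq (child : List (List Int)) (r : Int) (k : Nat)
    (h1 : -(child.length : Int) ≤ r) (h2 : r < (child.length : Int))
    (h3 : k < (child.getD (normC child.length r) []).length) :
    pyv child r (k : Int) = (child.getD (normC child.length r) [])[k] := by
  have hrow : PySem.List.pyGetD child r [] = child.getD (normC child.length r) [] := by
    by_cases hr : 0 ≤ r
    · rw [PySem.List.pyGetD_eq_getElem child [] hr h2]
      have hn : normC child.length r = r.toNat := by unfold normC; rw [if_neg (by omega)]
      rw [hn, List.getD_eq_getElem child [] (by omega)]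
    · obtain ⟨k', hk⟩ : ∃ k' : Nat, r = -(k' : Int) := ⟨(-r).toNat, by omega⟩
      subst hk
      rw [PySem.List.pyGetD_neg_natCast child k' [] (by omega) (by omega)]
      have hn : normC child.length (-(k' : Int)) = child.length - k' := by
        unfold normC; rw [if_pos (by omega)]; omega
      rw [hn, List.getD_eq_getElem child [] (by omega)]
  rw [pyv, hrow, PySem.List.pyGetD_natCast]
  exact List.getD_eq_getElem _ _ h3

theorem mem_row2 (child : List (List Int)) (j : Nat) (k : Nat) (hk : k < 2)
    (h : 2 ≤ (child.getD j []).length) : (child.getD j [])[k]'(by omega) ∈ row2 child j := by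
  have hlen : k < ((child.getD j []).take 2).length := by rw [List.length_take]; omega
  have hget : ((child.getD j []).take 2)[k]'hlen = (child.getD j [])[k]'(by omega) :=
    List.getElem_take
  rw [row2, ← hget]
  exact List.getElem_mem hlen

theorem mem_childrenF (child : List (List Int)) (j : Nat) (e : Int)
    (he : e ∈ row2 child j) (h1 : e ≠ -1) (h2 : -(child.length : Int) ≤ e) (h3 : e < (child.length : Int)) :
    normC child.length e ∈ childrenF child j := by
  simp only [childrenF, List.mem_toFinset, List.mem_filterMap]
  exact ⟨e, he, by rw [if_pos ⟨h1, h2, h3⟩]⟩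

theorem raw_mem (child : List (List Int)) (idx : Int) (j : Nat)
    (hj : j ∈ closureF child {normC child.length idx}) {e : Int} (he : e ∈ row2 child j) :
    e ∈ rawSet child idx := by
  simp only [rawSet, Finset.mem_insert, Finset.mem_biUnion]
  right
  exact ⟨j, hj, by simpa using he⟩

theorem nodup_len_le (n : Nat) (anc : List Nat) (hnd : anc.Nodup) (h : ∀ a ∈ anc, a < n) :
    anc.length ≤ n := by
  have h1 : anc.toFinset.card = anc.length := List.toFinset_card_of_nodup hnd
  have h2 : anc.toFinset ⊆ Finset.range n := by
    intro x hx
    simp only [List.mem_toFinset] at hx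
    simpa using h x hx
  have := Finset.card_le_card h2
  simp only [Finset.card_range] at this
  omega

-- MAIN SIMULATION: running B's stack loop on (r,false) consumes exactly `cost f r` iterations and
-- leaves dp as A's recursion leaves it; anc is the list of (normalised) proper ancestors of r.
theorem sim (l : Int) (num : List Int) (child : List (List Int)) (idx : Int)
    (hstab : stepF child (closureF child {normC child.length idx}) = closureF child {normC child.length idx})
    (hRrange : closureF child {normC child.length idx} ⊆ Finset.range child.length)
    (hAc : ∀ j ∈ closureF child {normC child.length idx}, j ∉ closureF child (childrenF child j))
    (hsh : ∀ r ∈ rawSet child idx, r ≠ -1 →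
      (-(child.length : Int) ≤ r ∧ r < (child.length : Int) ∧ 2 ≤ (child.getD (normC child.length r) []).length)) :
    ∀ (f : Nat) (r : Int) (anc : List Nat) (dp : List (List Int)) (rest : List (Int × Bool)) (F : Nat),
      r ≠ -1 → r ∈ rawSet child idx → normC child.length r ∈ closureF child {normC child.length idx} →
      anc.Nodup → (∀ a ∈ anc, a ∈ closureF child {normC child.length idx} ∧ Relation.TransGen (RelC child) a (normC child.length r)) →
      child.length - anc.length < f →
      dfsLoop l num child (cost child f r + F) ((r, false) :: rest) dp
        = dfsLoop l num child F rest (dfsGo l num child f r dp) := by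
  intro f
  induction f with
  | zero =>
    intro r anc dp rest F hr1 hrS hrR hnod hanc hf
    omega
  | succ f ih =>
    intro r anc dp rest F hr1 hrS hrR hnod hanc hf
    have hshr := hsh r hrS hr1
    obtain ⟨hr2, hr3, hrow⟩ := hshr
    have hL : pyv child r 0 = (child.getD (normC child.length r) [])[0]'(by omega) := by
      have := pyv_eq child r 0 hr2 hr3 (by omega)
      simpa using this
    have hR : pyv child r 1 = (child.getD (normC child.length r) [])[1]'(by omega) := by
      have := pyv_eq child r 1 hr2 hr3 (by omega)
      simpa using this
    have hmemL : pyv child r 0 ∈ row2 child (normC child.length r) := by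
      rw [hL]; exact mem_row2 child _ 0 (by omega) hrow
    have hmemR : pyv child r 1 ∈ row2 child (normC child.length r) := by
      rw [hR]; exact mem_row2 child _ 1 (by omega) hrow
    have hrawL : pyv child r 0 ∈ rawSet child idx := raw_mem child idx _ hrR hmemL
    have hrawR : pyv child r 1 ∈ rawSet child idx := raw_mem child idx _ hrR hmemR
    -- the current node is not its own ancestor
    have hnotin : normC child.length r ∉ anc := by
      intro ha
      exact not_transGen_self child _ (hAc _ hrR) (hanc _ ha).2
    have hancR : ∀ a ∈ anc, a < child.length := by
      intro a ha
      have := hRrange (hanc a ha).1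
      simpa using this
    have hlen : anc.length + 1 ≤ child.length := by
      have hnd' : (normC child.length r :: anc).Nodup := List.nodup_cons.mpr ⟨hnotin, hnod⟩
      have hlt : ∀ a ∈ normC child.length r :: anc, a < child.length := by
        intro a ha
        rcases List.mem_cons.mp ha with h | h
        · subst h
          have := hRrange hrR
          simpa using this
        · exact hancR a h
      have := nodup_len_le child.length _ hnd' hlt
      simpa using this
    -- invariants for a non-(-1) child e
    have hchild : ∀ e : Int, e ∈ row2 child (normC child.length r) → e ∈ rawSet child idx → e ≠ -1 →
        normC child.length e ∈ closureF child {normC child.length idx} ∧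
        RelC child (normC child.length r) (normC child.length e) := by
      intro e hmem hraw hne
      obtain ⟨he2, he3, _⟩ := hsh e hraw hne
      have hcf : normC child.length e ∈ childrenF child (normC child.length r) :=
        mem_childrenF child _ e hmem hne he2 he3
      constructor
      · rw [← hstab]
        simp only [stepF, Finset.mem_union, Finset.mem_biUnion]
        exact Or.inr ⟨_, hrR, hcf⟩
      · exact hcf
    have hancstep : ∀ e : Int, RelC child (normC child.length r) (normC child.length e) →
        ∀ a ∈ normC child.length r :: anc,
          a ∈ closureF child {normC child.length idx} ∧ Relation.TransGen (RelC child) a (normC child.length e) := by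
      intro e hrel a ha
      rcases List.mem_cons.mp ha with h | h
      · subst h; exact ⟨hrR, Relation.TransGen.single hrel⟩
      · exact ⟨(hanc a h).1, (hanc a h).2.tail hrel⟩
    set left := pyv child r 0 with hleft
    set right := pyv child r 1 with hright
    -- one unready step pushes (left,false), (right,false), (r,true)
    have step1 : dfsLoop l num child (cost child (f + 1) r + F) ((r, false) :: rest) dp
        = dfsLoop l num child (1 + cost child f left + cost child f right + F)
            ((left, false) :: (right, false) :: (r, true) :: rest) dp := by
      have hc : cost child (f + 1) r = 2 + cost child f left + cost child f right := by
        simp [cost, if_neg hr1, ← hleft, ← hright]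
      have harith : cost child (f + 1) r + F = (1 + cost child f left + cost child f right + F) + 1 := by omega
      rw [harith]
      simp [dfsLoop, if_neg hr1, ← hleft, ← hright]
    rw [step1]
    -- dispatch the left child
    have hstepL : dfsLoop l num child (1 + cost child f left + cost child f right + F)
          ((left, false) :: (right, false) :: (r, true) :: rest) dp
        = dfsLoop l num child (1 + cost child f right + F) ((right, false) :: (r, true) :: rest)
            (dfsGo l num child f left dp) := by
      by_cases hl1 : left = -1
      · rw [hl1, cost_neg1, go_neg1]
        have harith : 1 + 1 + cost child f right + F = (1 + cost child f right + F) + 1 := by omega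
        rw [harith, loop_neg1]
      · obtain ⟨hlR, hlrel⟩ := hchild left hmemL hrawL hl1
        have harith : 1 + cost child f left + cost child f right + F
            = cost child f left + (1 + cost child f right + F) := by omega
        rw [harith]
        exact ih left (normC child.length r :: anc) dp _ _ hl1 hrawL hlR
          (List.nodup_cons.mpr ⟨hnotin, hnod⟩) (hancstep left hlrel) (by simp; omega)
    rw [hstepL]
    -- dispatch the right child
    have hstepR : dfsLoop l num child (1 + cost child f right + F) ((right, false) :: (r, true) :: rest)
          (dfsGo l num child f left dp)
        = dfsLoop l num child (1 + F) ((r, true) :: rest)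
            (dfsGo l num child f right (dfsGo l num child f left dp)) := by
      by_cases hr1' : right = -1
      · rw [hr1', cost_neg1, go_neg1]
        have harith : 1 + 1 + F = (1 + F) + 1 := by omega
        rw [harith, loop_neg1]
      · obtain ⟨hrR', hrrel⟩ := hchild right hmemR hrawR hr1'
        have harith : 1 + cost child f right + F = cost child f right + (1 + F) := by omega
        rw [harith]
        exact ih right (normC child.length r :: anc) _ _ _ hr1' hrawR hrR'
          (List.nodup_cons.mpr ⟨hnotin, hnod⟩) (hancstep right hrrel) (by simp; omega)
    rw [hstepR]
    -- the ready step applies the recurrence once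
    have harith : 1 + F = F + 1 := by omega
    rw [harith]
    have hfinal : dfsLoop l num child (F + 1) ((r, true) :: rest)
          (dfsGo l num child f right (dfsGo l num child f left dp))
        = dfsLoop l num child F rest
            (stepB l num child r (dfsGo l num child f right (dfsGo l num child f left dp))) := by
      simp [dfsLoop, if_neg hr1]
    rw [hfinal, ← go_succ_eq l num child f r dp hr1]

-- ===== VERDICT (by name: the statement is the Claim_ definition above) =====
theorem dfs_spec : Claim_equal_dfs := by
  intro l idx num dp child _hdom hpre
  unfold Spec_dfs
  rcases hpre with h1 | ⟨hne, hraw, hAc⟩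
  · simp [dfs, dfs_alt, h1]
  · simp only [dfs, dfs_alt, if_neg hne]
    have hsh : ∀ r ∈ rawSet child idx, r ≠ -1 →
        (-(child.length : Int) ≤ r ∧ r < (child.length : Int) ∧ 2 ≤ (child.getD (normC child.length r) []).length) := by
      intro r hr hrne
      rcases (hraw r hr).2 with h | ⟨a, b, _, _, c⟩
      · exact absurd h hrne
      · exact ⟨a, b, c⟩
    have hidx : idx ∈ rawSet child idx := Finset.mem_insert_self idx _
    obtain ⟨hi2, hi3, _⟩ := hsh idx hidx hne
    have hseed : ({normC child.length idx} : Finset Nat) ⊆ Finset.range child.length := by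
      intro x hx
      simp only [Finset.mem_singleton] at hx
      subst hx
      simp only [Finset.mem_range, normC]
      omega
    have hRrange := iterate_range child _ hseed (child.length + 1)
    have hstab := closure_stable child _ hseed
    have hrR : normC child.length idx ∈ closureF child {normC child.length idx} :=
      subset_iterate child _ (child.length + 1) (Finset.mem_singleton_self _)
    have hc : cost child (child.length + 2) idx ≤ 3 * 2 ^ (child.length + 2) := by
      have := cost_le child (child.length + 2) idx
      omega
    have hsplit : 3 * 2 ^ (child.length + 2)
        = cost child (child.length + 2) idx + (3 * 2 ^ (child.length + 2) - cost child (child.length + 2) idx) := by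
      omega
    rw [hsplit,
      sim l num child idx hstab hRrange hAc hsh (child.length + 2) idx [] dp [] _ hne hidx hrR
        (List.nodup_nil) (by simp) (by omega),
      loop_nil]
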